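-- pv_equiv track=rewrite | github.com/youssefaly97/floodfill | maptoimage.py | stackCleaner
-- ===== SOURCE A (Python) =====
-- def stackCleaner(stack, pos):
--     tempStack=[]
--     while(len(stack)!=0):
--         tempHold=stack.pop()
--         if(tempHold==pos):
--             tempStack.clear()
--         tempStack.append(tempHold)
--     while(len(tempStack)):
--         stack.append(tempStack.pop())
--     return stack
-- ===== SOURCE B (Python) =====
-- def stackCleaner(stack, pos):
--     for i in range(len(stack)):
--         if stack[i] == pos:
--             del stack[i+1:]
--             break
--     return stack
-- ===== Notes on version B (the rewrite author's own statement) =====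
-- stated objective: simpler
-- what changed: Replaces A's pop-everything-into-a-temp-with-clear-on-match then push-back scheme with a single forward scan for the first occurrence of pos followed by one in-place slice deletion.
import Mathlib
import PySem

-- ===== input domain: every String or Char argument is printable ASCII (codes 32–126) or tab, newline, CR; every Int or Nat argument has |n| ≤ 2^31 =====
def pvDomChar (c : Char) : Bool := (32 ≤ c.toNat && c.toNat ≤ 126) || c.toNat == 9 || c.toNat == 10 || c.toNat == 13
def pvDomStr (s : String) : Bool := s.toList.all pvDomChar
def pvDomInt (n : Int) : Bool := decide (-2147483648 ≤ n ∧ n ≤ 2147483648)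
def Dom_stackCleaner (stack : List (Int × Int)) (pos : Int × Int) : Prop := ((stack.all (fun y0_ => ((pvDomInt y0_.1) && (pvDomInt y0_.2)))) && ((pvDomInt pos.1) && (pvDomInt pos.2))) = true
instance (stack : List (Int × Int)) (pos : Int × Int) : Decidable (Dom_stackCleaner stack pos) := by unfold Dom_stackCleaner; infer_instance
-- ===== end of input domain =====

-- B truncates the stack after the first occurrence of pos by one forward scan + slice deletion
-- instead of A's pop-all/clear-on-match/push-back-reversed scheme; equivalence of RETURN values
-- is proved (both Pythons mutate the argument list in place to the same final contents).

-- ===== PORT A =====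
-- A pops from the end of `stack` (= walks stack.reverse front to back), keeping tempStack,
-- clearing it on a match; tempStack is represented in reversed (most-recently-appended first)
-- order, so the final push-back loop (which reverses tempStack) is the accumulator itself.
def stackCleanerGo (pos : Int × Int) : List (Int × Int) → List (Int × Int) → List (Int × Int)
  | [], temp => temp
  | h :: t, temp => stackCleanerGo pos t (h :: (if h == pos then [] else temp))

def stackCleaner (stack : List (Int × Int)) (pos : Int × Int) : List (Int × Int) :=
  stackCleanerGo pos stack.reverse []

-- ===== PORT B =====
-- forward scan: keep elements up to and including the first one equal to pos; drop the rest.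
def stackCleaner_alt (stack : List (Int × Int)) (pos : Int × Int) : List (Int × Int) :=
  match stack with
  | [] => []
  | h :: t => if h == pos then [h] else h :: stackCleaner_alt t pos

-- ===== PRECONDITION & SPEC =====
def Spec_stackCleaner (stack : List (Int × Int)) (pos : Int × Int) (out : List (Int × Int)) : Prop := out = stackCleaner_alt stack pos
instance (stack : List (Int × Int)) (pos : Int × Int) (out : List (Int × Int)) : Decidable (Spec_stackCleaner stack pos out) := by unfold Spec_stackCleaner; infer_instance

-- ===== CLAIM (what is proved, stated in full; the proofs are below) =====
def Claim_equal_stackCleaner : Prop := ∀ (stack : List (Int × Int)) (pos : Int × Int), Dom_stackCleaner stack pos → Spec_stackCleaner stack pos (stackCleaner stack pos)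

-- ===== LEMMAS AND PROOFS =====

-- B on a list with `pos` absent returns the list unchanged.
theorem alt_of_not_mem (pos : Int × Int) (l : List (Int × Int)) (h : pos ∉ l) :
    stackCleaner_alt l pos = l := by
  induction l with
  | nil => rfl
  | cons a t ih =>
    simp only [List.mem_cons, not_or] at h
    simp only [stackCleaner_alt]
    rw [if_neg (by simpa [beq_iff_eq] using fun e => h.1 e.symm)]
    rw [ih h.2]

-- appending one more element at the end: ignored if pos already occurred, kept otherwise.
theorem alt_append_singleton (pos h : Int × Int) (l : List (Int × Int)) :
    stackCleaner_alt (l ++ [h]) pos =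
      if pos ∈ l then stackCleaner_alt l pos else l ++ [h] := by
  induction l with
  | nil =>
    by_cases e : h = pos
    · subst e; simp [stackCleaner_alt]
    · simp [stackCleaner_alt, e]
  | cons a t ih =>
    by_cases e : a = pos
    · subst e; simp [stackCleaner_alt]
    · by_cases hm : pos ∈ t
      · simp [stackCleaner_alt, e, ih, hm, Ne.symm e]
      · simp [stackCleaner_alt, e, ih, hm, Ne.symm e]

-- invariant of A's first loop (on the reversed stack, with reversed-order accumulator).
theorem go_eq (pos : Int × Int) (rev temp : List (Int × Int)) :
    stackCleanerGo pos rev temp =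
      stackCleaner_alt rev.reverse pos ++ (if pos ∈ rev then [] else temp) := by
  induction rev generalizing temp with
  | nil => simp [stackCleanerGo, stackCleaner_alt]
  | cons h t ih =>
    simp only [stackCleanerGo, List.reverse_cons, List.mem_cons]
    rw [ih, alt_append_singleton]
    by_cases hm : pos ∈ t
    · have hr : pos ∈ t.reverse := by simpa using hm
      simp [hm, hr]
    · have hn : pos ∉ t.reverse := by simpa using hm
      rw [if_neg hn, alt_of_not_mem pos t.reverse hn]
      by_cases e : h = pos
      · subst e; simp [hm]
      · simp [hm, e, Ne.symm e]

-- ===== VERDICT (by name: the statement is the Claim_ definition above) =====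
theorem stackCleaner_spec : Claim_equal_stackCleaner := by
  intro stack pos _
  unfold Spec_stackCleaner stackCleaner
  rw [go_eq]
  simp
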